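-- pv_equiv track=rewrite | github.com/everysoftware/algorithms-course | src/l_dp2/max_robot_sum.py | max_robot_sum
-- ===== SOURCE A (Python) =====
-- def max_robot_sum(coins: list[list[int]]) -> int:
--     m, n = len(coins), len(coins[0])
--     dp = [[[-(10**20)] * 3 for _ in range(n)] for _ in range(m)]
--     for k in range(3):
--         dp[0][0][k] = 0 if coins[0][0] < 0 and k > 0 else coins[0][0]
--     for i in range(m):
--         for j in range(n):
--             for k in range(3):
--                 if i == 0 and j == 0:
--                     continue
--                 gain = coins[i][j]
--                 if i > 0:
--                     dp[i][j][k] = max(dp[i][j][k], dp[i - 1][j][k] + gain)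
--                     if k > 0 and gain < 0:
--                         dp[i][j][k] = max(dp[i][j][k], dp[i - 1][j][k - 1])
--                 if j > 0:
--                     dp[i][j][k] = max(dp[i][j][k], dp[i][j - 1][k] + gain)
--                     if k > 0 and gain < 0:
--                         dp[i][j][k] = max(dp[i][j][k], dp[i][j - 1][k - 1])
--     return dp[-1][-1][-1]
-- ===== SOURCE B (Python) =====
-- def max_robot_sum(coins: list[list[int]]) -> int:
--     m, n = len(coins), len(coins[0])
--     memo = {}
--
--     def best(i, j, k):
--         # max path sum from (0,0) to (i,j) with up to k neutralizations left
--         if i == 0 and j == 0: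
--             c = coins[0][0]
--             return 0 if c < 0 and k > 0 else c
--         key = (i, j, k)
--         if key in memo:
--             return memo[key]
--         c = coins[i][j]
--         res = -(10 ** 20)
--         if i > 0:
--             res = max(res, best(i - 1, j, k) + c)
--             if k > 0 and c < 0:
--                 res = max(res, best(i - 1, j, k - 1))
--         if j > 0:
--             res = max(res, best(i, j - 1, k) + c)
--             if k > 0 and c < 0:
--                 res = max(res, best(i, j - 1, k - 1))
--         memo[key] = res
--         return res
--
--     return best(m - 1, n - 1, 2)
-- ===== Notes on version B (the rewrite author's own statement) =====
-- stated objective: alternative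
-- what changed: B replaces A's bottom-up m*n*3 DP table filled by three nested loops with in-place max-updates by a top-down memoized recursion best(i,j,k) over (cell, neutralizations-left), computing only states reachable from the target and returning best(m-1,n-1,2).
import Mathlib
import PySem

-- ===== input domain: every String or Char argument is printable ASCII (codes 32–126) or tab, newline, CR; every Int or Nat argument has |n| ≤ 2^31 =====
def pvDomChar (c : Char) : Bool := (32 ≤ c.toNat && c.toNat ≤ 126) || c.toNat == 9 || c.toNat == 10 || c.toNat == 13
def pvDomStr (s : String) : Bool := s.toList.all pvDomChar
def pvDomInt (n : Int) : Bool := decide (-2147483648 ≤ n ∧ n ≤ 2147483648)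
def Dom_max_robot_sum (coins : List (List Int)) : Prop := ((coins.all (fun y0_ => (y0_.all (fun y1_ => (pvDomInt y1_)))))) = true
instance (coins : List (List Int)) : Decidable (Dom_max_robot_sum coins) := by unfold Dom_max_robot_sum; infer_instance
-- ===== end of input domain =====

-- B replaces A's bottom-up triple-nested table sweep with top-down memoized recursion best(i,j,k); objective: alternative decomposition, same asymptotic cost.

def pvNeg : Int := -(10 ^ 20)

-- ===== PORT A =====
-- helpers for A's dp-table reads/writes (dp[i][j][k] access and assignment)
def pvGetCell (dp : List (List (List Int))) (i j : Nat) : List Int :=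
  (dp.getD i []).getD j []

def pvGetK (dp : List (List (List Int))) (i j k : Nat) : Int :=
  (pvGetCell dp i j).getD k 0

def pvSetK (dp : List (List (List Int))) (i j k : Nat) (v : Int) : List (List (List Int)) :=
  dp.set i ((dp.getD i []).set j ((pvGetCell dp i j).set k v))

-- coins[i][j] (in-range under Pre_)
def pvCoin (coins : List (List Int)) (i j : Nat) : Int := (coins.getD i []).getD j 0

-- body of A's innermost `for k in range(3)` loop
def pvStepK (coins : List (List Int)) (i j : Nat)
    (dp : List (List (List Int))) (k : Nat) : List (List (List Int)) :=
  if i = 0 ∧ j = 0 then dp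
  else
    let gain := pvCoin coins i j
    let dp :=
      if 0 < i then
        let dp := pvSetK dp i j k (max (pvGetK dp i j k) (pvGetK dp (i-1) j k + gain))
        if 0 < k ∧ gain < 0 then
          pvSetK dp i j k (max (pvGetK dp i j k) (pvGetK dp (i-1) j (k-1)))
        else dp
      else dp
    if 0 < j then
      let dp := pvSetK dp i j k (max (pvGetK dp i j k) (pvGetK dp i (j-1) k + gain))
      if 0 < k ∧ gain < 0 then
        pvSetK dp i j k (max (pvGetK dp i j k) (pvGetK dp i (j-1) (k-1)))
      else dp
    else dp

def max_robot_sum (coins : List (List Int)) : Int :=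
  let m := coins.length
  let n := ((PySem.List.pyGet? coins 0).getD []).length
  let dp0 := List.replicate m (List.replicate n (List.replicate 3 pvNeg))
  let c00 := pvCoin coins 0 0
  let dp1 := (List.range 3).foldl
      (fun dp k => pvSetK dp 0 0 k (if c00 < 0 ∧ 0 < k then 0 else c00)) dp0
  let dp2 := (List.range m).foldl (fun dp i =>
      (List.range n).foldl (fun dp j =>
        (List.range 3).foldl (pvStepK coins i j) dp) dp) dp1
  (PySem.List.pyGet? ((PySem.List.pyGet? ((PySem.List.pyGet? dp2 (-1)).getD []) (-1)).getD []) (-1)).getD 0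

-- ===== PORT B =====
-- best(i, j, k): max path sum to (i,j) with up to k neutralizations left, threading
-- the memo dict through the recursive calls exactly as Source B's `memo` is shared
def bestB (coins : List (List Int)) (i j k : Nat)
    (memo : PySem.Dict (Nat × Nat × Nat) Int) : Int × PySem.Dict (Nat × Nat × Nat) Int :=
  if i = 0 ∧ j = 0 then
    let c := pvCoin coins 0 0
    (if c < 0 ∧ 0 < k then 0 else c, memo)
  else
    match PySem.Dict.get? memo (i, j, k) with
    | some v => (v, memo)
    | none =>
      let c := pvCoin coins i j
      let p1 : Int × PySem.Dict (Nat × Nat × Nat) Int :=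
        if _h : 0 < i then
          let q := bestB coins (i - 1) j k memo
          let r := max pvNeg (q.1 + c)
          if 0 < k ∧ c < 0 then
            let q2 := bestB coins (i - 1) j (k - 1) q.2
            (max r q2.1, q2.2)
          else (r, q.2)
        else (pvNeg, memo)
      let p2 : Int × PySem.Dict (Nat × Nat × Nat) Int :=
        if _h : 0 < j then
          let q := bestB coins i (j - 1) k p1.2
          let r := max p1.1 (q.1 + c)
          if 0 < k ∧ c < 0 then
            let q2 := bestB coins i (j - 1) (k - 1) q.2
            (max r q2.1, q2.2)
          else (r, q.2)
        else p1
      (p2.1, PySem.Dict.insert p2.2 (i, j, k) p2.1)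
termination_by i + j
decreasing_by all_goals omega

def max_robot_sum_alt (coins : List (List Int)) : Int :=
  let m := coins.length
  let n := ((PySem.List.pyGet? coins 0).getD []).length
  (bestB coins (m - 1) (n - 1) 2 PySem.Dict.empty).1

-- ===== PRECONDITION & SPEC =====
-- Pre_ excludes exactly the inputs where A raises IndexError: empty coins, empty first
-- row, or a later row shorter than the first (coins[i][j] out of range).
def Pre_max_robot_sum (coins : List (List Int)) : Prop :=
  coins ≠ [] ∧ 0 < (coins.headD []).length ∧
    ∀ row ∈ coins, (coins.headD []).length ≤ row.length

instance (coins : List (List Int)) : Decidable (Pre_max_robot_sum coins) := by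
  unfold Pre_max_robot_sum; infer_instance

def pvWitness_max_robot_sum : List (List Int) := [[1, -2], [-3, 4]]

def Spec_max_robot_sum (coins : List (List Int)) (out : Int) : Prop := out = max_robot_sum_alt coins
instance (coins : List (List Int)) (out : Int) : Decidable (Spec_max_robot_sum coins out) := by unfold Spec_max_robot_sum; infer_instance

-- ===== CLAIM (what is proved, stated in full; the proofs are below) =====
def Claim_equal_max_robot_sum : Prop := ∀ (coins : List (List Int)), Dom_max_robot_sum coins → Pre_max_robot_sum coins → Spec_max_robot_sum coins (max_robot_sum coins)

-- ===== LEMMAS AND PROOFS =====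

-- a table as a pointwise function over an m×n grid
def tbl (m n : Nat) (f : Nat → Nat → List Int) : List (List (List Int)) :=
  (List.range m).map (fun r => (List.range n).map (f r))

def listify (t : Int × Int × Int) : List Int := [t.1, t.2.1, t.2.2]

def tripleOfList (l : List Int) : Int × Int × Int := (l.getD 0 0, l.getD 1 0, l.getD 2 0)

-- nb[k] for a neighbour triple
def pvNbGet (t : Int × Int × Int) (k : Nat) : Int :=
  if k = 0 then t.1 else if k = 1 then t.2.1 else t.2.2

-- candidate list for one k from the optional up/left neighbours
def pvNbVals (nb : Option (Int × Int × Int)) (c : Int) (k : Nat) : List Int :=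
  match nb with
  | none => []
  | some t => [pvNbGet t k + c] ++ (if 0 < k ∧ c < 0 then [pvNbGet t (k-1)] else [])

def pvCand (up left : Option (Int × Int × Int)) (c : Int) (k : Nat) : Int :=
  (pvNbVals up c k ++ pvNbVals left c k).foldl max pvNeg

-- value triple of one cell from its neighbours
def pvCellB (up left : Option (Int × Int × Int)) (c : Int) : Int × Int × Int :=
  (pvCand up left c 0, pvCand up left c 1, pvCand up left c 2)

-- the mathematical per-cell value both programs compute
def cellF (coins : List (List Int)) (i j : Nat) : Int × Int × Int :=
  if i = 0 ∧ j = 0 then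
    let c := pvCoin coins 0 0
    (c, if c < 0 then 0 else c, if c < 0 then 0 else c)
  else
    pvCellB (if _ : 0 < i then some (cellF coins (i-1) j) else none)
            (if _ : 0 < j then some (cellF coins i (j-1)) else none)
            (pvCoin coins i j)
termination_by i + j
decreasing_by all_goals omega

lemma cellF_base (coins : List (List Int)) :
    cellF coins 0 0 =
      (pvCoin coins 0 0, if pvCoin coins 0 0 < 0 then 0 else pvCoin coins 0 0,
       if pvCoin coins 0 0 < 0 then 0 else pvCoin coins 0 0) := by
  rw [cellF]; simp

lemma cellF_step (coins : List (List Int)) (i j : Nat) (hij : ¬(i = 0 ∧ j = 0)) :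
    cellF coins i j =
      pvCellB (if 0 < i then some (cellF coins (i-1) j) else none)
              (if 0 < j then some (cellF coins i (j-1)) else none)
              (pvCoin coins i j) := by
  rw [cellF]; simp [hij]

lemma tripleOfList_listify (t : Int × Int × Int) : tripleOfList (listify t) = t := by
  simp [tripleOfList, listify]

lemma map_range_set {α : Type} (m i : Nat) (f : Nat → α) (x : α) :
    ((List.range m).map f).set i x
      = (List.range m).map (fun r => if r = i then x else f r) := by
  apply List.ext_getElem
  · simp
  · intro r h1 h2
    rw [List.getElem_set]
    simp only [List.getElem_map, List.getElem_range]
    by_cases h : r = i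
    · simp [h]
    · simp [h, Ne.symm h]

lemma tbl_getCell (m n : Nat) (f : Nat → Nat → List Int) (r c : Nat) :
    pvGetCell (tbl m n f) r c = if r < m ∧ c < n then f r c else [] := by
  unfold pvGetCell tbl
  rw [List.getD_eq_getElem?_getD, List.getD_eq_getElem?_getD]
  simp only [List.getElem?_map, List.getElem?_range]
  by_cases h : r < m
  · by_cases h2 : c < n <;> simp [h, h2]
  · simp [h]

lemma tbl_row (m n : Nat) (f : Nat → Nat → List Int) (r : Nat) (h : r < m) :
    (tbl m n f).getD r [] = (List.range n).map (f r) := by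
  unfold tbl
  rw [List.getD_eq_getElem?_getD]
  simp [h]

lemma tbl_congr (m n : Nat) (f g : Nat → Nat → List Int)
    (h : ∀ r < m, ∀ c < n, f r c = g r c) : tbl m n f = tbl m n g := by
  unfold tbl
  apply List.map_congr_left
  intro r hr
  apply List.map_congr_left
  intro c hc
  exact h r (List.mem_range.mp hr) c (List.mem_range.mp hc)

-- pointwise single-cell update of a table function
def updF (f : Nat → Nat → List Int) (i j : Nat) (cell : List Int) : Nat → Nat → List Int :=
  fun r c => if r = i ∧ c = j then cell else f r c

lemma tbl_setK (m n : Nat) (f : Nat → Nat → List Int) (i j k : Nat) (v : Int)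
    (hi : i < m) (hj : j < n) :
    pvSetK (tbl m n f) i j k v = tbl m n (updF f i j ((f i j).set k v)) := by
  unfold pvSetK
  rw [tbl_getCell, if_pos ⟨hi, hj⟩, tbl_row m n f i hi, map_range_set]
  unfold tbl
  rw [map_range_set]
  apply List.map_congr_left
  intro r hr
  by_cases h : r = i
  · subst h
    simp only [if_pos rfl]
    apply List.map_congr_left
    intro c hc
    by_cases h2 : c = j <;> simp [updF, h2]
  · simp only [if_neg h]
    apply List.map_congr_left
    intro c hc
    simp [updF, h]

lemma updF_updF (f : Nat → Nat → List Int) (i j : Nat) (c1 c2 : List Int) :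
    updF (updF f i j c1) i j c2 = updF f i j c2 := by
  funext r c
  by_cases h : r = i ∧ c = j <;> simp [updF, h]

lemma updF_self (f : Nat → Nat → List Int) (i j : Nat) (c : List Int) :
    updF f i j c i j = c := by simp [updF]

lemma updF_ne (f : Nat → Nat → List Int) (i j r c : Nat) (cell : List Int)
    (h : ¬(r = i ∧ c = j)) : updF f i j cell r c = f r c := by simp [updF, h]

lemma nbGet_tripleOfList (l : List Int) (k : Nat) (hk : k < 3) :
    pvNbGet (tripleOfList l) k = l.getD k 0 := by
  unfold pvNbGet tripleOfList
  interval_cases k <;> simp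

-- A's sequential max chain for one k, starting from v0
def candA (u l : Option (Int × Int × Int)) (g : Int) (k : Nat) (v0 : Int) : Int :=
  let v1 := match u with
    | none => v0
    | some t =>
      let a := max v0 (pvNbGet t k + g)
      if 0 < k ∧ g < 0 then max a (pvNbGet t (k-1)) else a
  match l with
  | none => v1
  | some t =>
    let a := max v1 (pvNbGet t k + g)
    if 0 < k ∧ g < 0 then max a (pvNbGet t (k-1)) else a

lemma cand_eq_candA (u l : Option (Int × Int × Int)) (g : Int) (k : Nat) :
    pvCand u l g k = candA u l g k pvNeg := by
  cases u <;> cases l <;>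
    by_cases hg : 0 < k ∧ g < 0 <;>
      simp [pvCand, candA, pvNbVals, hg, List.foldl]

lemma stepK_tbl (coins : List (List Int)) (m n i j k : Nat) (f : Nat → Nat → List Int)
    (hi : i < m) (hj : j < n) (hij : ¬(i = 0 ∧ j = 0)) (hk : k < 3)
    (hlen : (f i j).length = 3) :
    pvStepK coins i j (tbl m n f) k
      = tbl m n (updF f i j ((f i j).set k
          (candA (if 0 < i then some (tripleOfList (f (i-1) j)) else none)
                 (if 0 < j then some (tripleOfList (f i (j-1))) else none)
                 (pvCoin coins i j) k ((f i j).getD k 0)))) := by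
  have gij : ∀ (g : Nat → Nat → List Int) (kk : Nat), pvGetK (tbl m n g) i j kk = (g i j).getD kk 0 := by
    intro g kk; unfold pvGetK; rw [tbl_getCell, if_pos ⟨hi, hj⟩]
  have gup : ∀ (g : Nat → Nat → List Int) (kk : Nat), pvGetK (tbl m n g) (i-1) j kk = (g (i-1) j).getD kk 0 := by
    intro g kk; unfold pvGetK; rw [tbl_getCell, if_pos ⟨by omega, hj⟩]
  have gleft : ∀ (g : Nat → Nat → List Int) (kk : Nat), pvGetK (tbl m n g) i (j-1) kk = (g i (j-1)).getD kk 0 := by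
    intro g kk; unfold pvGetK; rw [tbl_getCell, if_pos ⟨hi, by omega⟩]
  have nb1 : ∀ l : List Int, pvNbGet (tripleOfList l) k = l.getD k 0 := fun l => nbGet_tripleOfList l k hk
  have nb2 : ∀ l : List Int, pvNbGet (tripleOfList l) (k-1) = l.getD (k-1) 0 := fun l => nbGet_tripleOfList l (k-1) (by omega)
  have gset : ∀ v : Int, ((f i j).set k v).getD k 0 = v := by
    intro v
    rw [List.getD_eq_getElem?_getD, List.getElem?_set_self (by omega)]
    rfl
  unfold pvStepK
  rw [if_neg hij]
  by_cases hi0 : 0 < i <;> by_cases hj0 : 0 < j <;>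
    by_cases hg : 0 < k ∧ pvCoin coins i j < 0
  all_goals first
    | omega
    | (simp only [hi0, hj0, hg, if_true, if_false, ite_true, ite_false, and_self,
        true_and, and_true, candA, nb1, nb2]
       repeat first
         | rw [tbl_setK m n _ i j _ _ hi hj]
         | simp only [gij, gup, gleft, gset, updF_self, updF_updF, List.set_set]
       try simp only [fun (g : Nat → Nat → List Int) (cell : List Int) =>
             (updF_ne g i j (i-1) j cell (by omega) : _)]
       try simp only [fun (g : Nat → Nat → List Int) (cell : List Int) =>
             (updF_ne g i j i (j-1) cell (by omega) : _)])

lemma kfold3 (coins : List (List Int)) (m n i j : Nat) (f : Nat → Nat → List Int)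
    (hi : i < m) (hj : j < n) (hij : ¬(i = 0 ∧ j = 0))
    (hcell : f i j = List.replicate 3 pvNeg) :
    (List.range 3).foldl (pvStepK coins i j) (tbl m n f)
      = tbl m n (updF f i j (listify (pvCellB
          (if 0 < i then some (tripleOfList (f (i-1) j)) else none)
          (if 0 < j then some (tripleOfList (f i (j-1))) else none)
          (pvCoin coins i j)))) := by
  have hr3 : List.range 3 = [0, 1, 2] := by decide
  rw [hr3]
  simp only [List.foldl]
  rw [stepK_tbl coins m n i j 0 f hi hj hij (by omega) (by rw [hcell]; rfl)]
  rw [stepK_tbl coins m n i j 1 _ hi hj hij (by omega) (by simp [updF, hcell])]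
  rw [stepK_tbl coins m n i j 2 _ hi hj hij (by omega) (by simp [updF, hcell])]
  apply tbl_congr
  intro r hr c hc
  by_cases hrc : r = i ∧ c = j
  · obtain ⟨rfl, rfl⟩ := hrc
    by_cases hi0 : 0 < r <;> by_cases hj0 : 0 < c
    · have hu : r - 1 ≠ r := by omega
      have hl : c - 1 ≠ c := by omega
      simp [updF, hcell, pvCellB, listify, cand_eq_candA, hi0, hj0, hu, hl,
        List.replicate, pvNeg]
    · have hu : r - 1 ≠ r := by omega
      simp [updF, hcell, pvCellB, listify, cand_eq_candA, hi0, hj0, hu,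
        List.replicate, pvNeg]
    · have hl : c - 1 ≠ c := by omega
      simp [updF, hcell, pvCellB, listify, cand_eq_candA, hi0, hj0, hl,
        List.replicate, pvNeg]
    · omega
  · simp [updF, hrc]

-- state of A's table after the first i rows and, within row i, the first j cells
def fPart (coins : List (List Int)) (i j : Nat) : Nat → Nat → List Int :=
  fun r c => if r < i ∨ (r = i ∧ (c < j ∨ (i = 0 ∧ c = 0)))
    then listify (cellF coins r c) else List.replicate 3 pvNeg

lemma fPart_on (coins : List (List Int)) (i j r c : Nat)
    (h : r < i ∨ (r = i ∧ (c < j ∨ (i = 0 ∧ c = 0)))) :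
    fPart coins i j r c = listify (cellF coins r c) := by
  simp only [fPart]; exact if_pos h

lemma fPart_off (coins : List (List Int)) (i j r c : Nat)
    (h : ¬(r < i ∨ (r = i ∧ (c < j ∨ (i = 0 ∧ c = 0))))) :
    fPart coins i j r c = List.replicate 3 pvNeg := by
  simp only [fPart]; exact if_neg h

lemma fPart_congr (coins : List (List Int)) (i j i' j' r c : Nat)
    (h : (r < i ∨ (r = i ∧ (c < j ∨ (i = 0 ∧ c = 0))))
       ↔ (r < i' ∨ (r = i' ∧ (c < j' ∨ (i' = 0 ∧ c = 0))))) :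
    fPart coins i j r c = fPart coins i' j' r c := by
  simp only [fPart]
  exact if_congr h rfl rfl

lemma dp1_eq (coins : List (List Int)) (m n : Nat) (hm : 0 < m) (hn : 0 < n) :
    (List.range 3).foldl
      (fun dp k => pvSetK dp 0 0 k (if pvCoin coins 0 0 < 0 ∧ 0 < k then 0 else pvCoin coins 0 0))
      (List.replicate m (List.replicate n (List.replicate 3 pvNeg)))
      = tbl m n (fPart coins 0 0) := by
  have h0 : List.replicate m (List.replicate n (List.replicate 3 pvNeg))
      = tbl m n (fun _ _ => List.replicate 3 pvNeg) := by
    simp [tbl, List.map_const']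
  have hr3 : List.range 3 = [0, 1, 2] := by decide
  rw [h0, hr3]
  simp only [List.foldl]
  rw [tbl_setK m n _ 0 0 0 _ hm hn,
      tbl_setK m n _ 0 0 1 _ hm hn,
      tbl_setK m n _ 0 0 2 _ hm hn]
  simp only [updF_self, updF_updF]
  apply tbl_congr
  intro r hr c hc
  by_cases hrc : r = 0 ∧ c = 0
  · obtain ⟨rfl, rfl⟩ := hrc
    rw [updF_self, fPart_on coins 0 0 0 0 (Or.inr ⟨rfl, Or.inr ⟨rfl, rfl⟩⟩), cellF_base]
    simp [listify, List.replicate]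
  · rw [updF_ne _ _ _ _ _ _ hrc,
        fPart_off coins 0 0 r c (by omega)]

lemma rowfold (coins : List (List Int)) (m n i : Nat) (hi : i < m) :
    ∀ j, j ≤ n →
      (List.range j).foldl (fun dp j' => (List.range 3).foldl (pvStepK coins i j') dp)
        (tbl m n (fPart coins i 0))
        = tbl m n (fPart coins i j) := by
  intro j
  induction j with
  | zero => intro _; rfl
  | succ j ih =>
    intro hj
    rw [List.range_succ (n := j), List.foldl_append, ih (by omega),
        List.foldl_cons, List.foldl_nil]
    by_cases hij : i = 0 ∧ j = 0
    · obtain ⟨rfl, rfl⟩ := hij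
      have hid : ∀ (dp : List (List (List Int))) (k : Nat), pvStepK coins 0 0 dp k = dp := by
        intro dp k; simp [pvStepK]
      have hr3 : List.range 3 = [0, 1, 2] := by decide
      rw [hr3]
      simp only [List.foldl, hid]
      exact tbl_congr _ _ _ _ (fun r hr c hc => fPart_congr coins 0 0 0 1 r c (by omega))
    · rw [kfold3 coins m n i j _ hi (by omega) hij
        (fPart_off coins i j i j (by omega))]
      apply tbl_congr
      intro r hr c hc
      by_cases hrc : r = i ∧ c = j
      · obtain ⟨rfl, rfl⟩ := hrc
        rw [updF_self]
        have e1 : (if 0 < r then some (tripleOfList (fPart coins r c (r-1) c)) else none)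
            = (if 0 < r then some (cellF coins (r-1) c) else none) := by
          by_cases h : 0 < r
          · rw [if_pos h, if_pos h,
              fPart_on coins r c (r-1) c (Or.inl (by omega)), tripleOfList_listify]
          · rw [if_neg h, if_neg h]
        have e2 : (if 0 < c then some (tripleOfList (fPart coins r c r (c-1))) else none)
            = (if 0 < c then some (cellF coins r (c-1)) else none) := by
          by_cases h : 0 < c
          · rw [if_pos h, if_pos h,
              fPart_on coins r c r (c-1) (Or.inr ⟨rfl, Or.inl (by omega)⟩), tripleOfList_listify]
          · rw [if_neg h, if_neg h]
        rw [e1, e2, ← cellF_step coins r c hij,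
            fPart_on coins r (c+1) r c (Or.inr ⟨rfl, Or.inl (by omega)⟩)]
      · rw [updF_ne _ _ _ _ _ _ hrc]
        exact fPart_congr coins i j i (j+1) r c (by omega)

lemma outerfold (coins : List (List Int)) (m n : Nat) :
    ∀ i, i ≤ m →
      (List.range i).foldl (fun dp i' =>
          (List.range n).foldl (fun dp j =>
            (List.range 3).foldl (pvStepK coins i' j) dp) dp)
        (tbl m n (fPart coins 0 0))
        = tbl m n (fPart coins i 0) := by
  intro i
  induction i with
  | zero => intro _; rfl
  | succ i ih =>
    intro hi
    rw [List.range_succ (n := i), List.foldl_append, ih (by omega),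
        List.foldl_cons, List.foldl_nil, rowfold coins m n i (by omega) n le_rfl]
    exact tbl_congr _ _ _ _ (fun r hr c hc => fPart_congr coins i n (i+1) 0 r c (by omega))

-- ===== B-side lemmas: the memoized recursion computes cellF's components =====

-- nb[k] of a cell triple is that k's candidate chain
lemma nbGet_cellB (u l : Option (Int × Int × Int)) (c : Int) (k : Nat) (hk : k < 3) :
    pvNbGet (pvCellB u l c) k = pvCand u l c k := by
  unfold pvNbGet pvCellB
  interval_cases k <;> simp

-- the memo-free value of best(i, j, k) (same branch structure as bestB, no dict)
def cellG (coins : List (List Int)) (i j k : Nat) : Int :=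
  if i = 0 ∧ j = 0 then
    let c := pvCoin coins 0 0
    if c < 0 ∧ 0 < k then 0 else c
  else
    let c := pvCoin coins i j
    let r1 := if _h : 0 < i then
        let r := max pvNeg (cellG coins (i - 1) j k + c)
        if 0 < k ∧ c < 0 then max r (cellG coins (i - 1) j (k - 1)) else r
      else pvNeg
    if _h : 0 < j then
      let r := max r1 (cellG coins i (j - 1) k + c)
      if 0 < k ∧ c < 0 then max r (cellG coins i (j - 1) (k - 1)) else r
    else r1
termination_by i + j
decreasing_by all_goals omega

-- every value stored in the memo is the memo-free value of its key
def InvB (coins : List (List Int)) (memo : PySem.Dict (Nat × Nat × Nat) Int) : Prop :=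
  ∀ i j k v, PySem.Dict.get? memo (i, j, k) = some v → v = cellG coins i j k

lemma invB_empty (coins : List (List Int)) : InvB coins PySem.Dict.empty := by
  intro i j k v h
  simp [PySem.Dict.get?_empty] at h

lemma invB_insert (coins : List (List Int)) (memo : PySem.Dict (Nat × Nat × Nat) Int)
    (i j k : Nat) (h : InvB coins memo) :
    InvB coins (PySem.Dict.insert memo (i, j, k) (cellG coins i j k)) := by
  intro i' j' k' v hv
  rw [PySem.Dict.get?_insert] at hv
  by_cases hk : ((i', j', k') : Nat × Nat × Nat) = (i, j, k)
  · rw [if_pos hk] at hv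
    injection hv with hv
    have he : i' = i ∧ j' = j ∧ k' = k := by simpa [Prod.ext_iff] using hk
    obtain ⟨rfl, rfl, rfl⟩ := he
    exact hv.symm
  · rw [if_neg hk] at hv
    exact h _ _ _ _ hv

lemma bestB_eval (coins : List (List Int)) :
    ∀ N i j k memo, i + j ≤ N → InvB coins memo →
      (bestB coins i j k memo).1 = cellG coins i j k ∧ InvB coins (bestB coins i j k memo).2 := by
  intro N
  induction N with
  | zero =>
    intro i j k memo hN hInv
    have hi : i = 0 := by omega
    have hj : j = 0 := by omega
    subst hi; subst hj
    rw [bestB, cellG]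
    simp only [if_pos (⟨rfl, rfl⟩ : (0 : Nat) = 0 ∧ (0 : Nat) = 0)]
    exact ⟨rfl, hInv⟩
  | succ N ih =>
    intro i j k memo hN hInv
    by_cases hij : i = 0 ∧ j = 0
    · obtain ⟨rfl, rfl⟩ := hij
      rw [bestB, cellG]
      simp only [if_pos (⟨rfl, rfl⟩ : (0 : Nat) = 0 ∧ (0 : Nat) = 0)]
      exact ⟨rfl, hInv⟩
    · rw [bestB]
      rw [if_neg hij]
      cases hm : PySem.Dict.get? memo (i, j, k) with
      | some v =>
        dsimp only
        exact ⟨hInv i j k v hm, hInv⟩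
      | none =>
        dsimp only
        by_cases hi0 : 0 < i <;> by_cases hj0 : 0 < j <;>
          by_cases hg : 0 < k ∧ pvCoin coins i j < 0
        -- hi0, hj0, hg
        · have h1 := ih (i - 1) j k memo (by omega) hInv
          have h2 := ih (i - 1) j (k - 1) _ (by omega) h1.2
          have h3 := ih i (j - 1) k _ (by omega) h2.2
          have h4 := ih i (j - 1) (k - 1) _ (by omega) h3.2
          have hval : cellG coins i j k
              = max (max (max (max pvNeg (cellG coins (i - 1) j k + pvCoin coins i j))
                    (cellG coins (i - 1) j (k - 1))) (cellG coins i (j - 1) k + pvCoin coins i j))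
                  (cellG coins i (j - 1) (k - 1)) := by
            rw [cellG]; simp only [if_neg hij, dif_pos hi0, dif_pos hj0, if_pos hg]
          simp only [dif_pos hi0, dif_pos hj0, if_pos hg, h1.1, h2.1, h3.1, h4.1]
          exact ⟨hval.symm, by rw [← hval]; exact invB_insert coins _ i j k h4.2⟩
        -- hi0, hj0, ¬hg
        · have h1 := ih (i - 1) j k memo (by omega) hInv
          have h3 := ih i (j - 1) k _ (by omega) h1.2
          have hval : cellG coins i j k
              = max (max pvNeg (cellG coins (i - 1) j k + pvCoin coins i j))
                  (cellG coins i (j - 1) k + pvCoin coins i j) := by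
            rw [cellG]; simp only [if_neg hij, dif_pos hi0, dif_pos hj0, if_neg hg]
          simp only [dif_pos hi0, dif_pos hj0, if_neg hg, h1.1, h3.1]
          exact ⟨hval.symm, by rw [← hval]; exact invB_insert coins _ i j k h3.2⟩
        -- hi0, ¬hj0, hg
        · have h1 := ih (i - 1) j k memo (by omega) hInv
          have h2 := ih (i - 1) j (k - 1) _ (by omega) h1.2
          have hval : cellG coins i j k
              = max (max pvNeg (cellG coins (i - 1) j k + pvCoin coins i j))
                  (cellG coins (i - 1) j (k - 1)) := by
            rw [cellG]; simp only [if_neg hij, dif_pos hi0, dif_neg hj0, if_pos hg]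
          simp only [dif_pos hi0, dif_neg hj0, if_pos hg, h1.1, h2.1]
          exact ⟨hval.symm, by rw [← hval]; exact invB_insert coins _ i j k h2.2⟩
        -- hi0, ¬hj0, ¬hg
        · have h1 := ih (i - 1) j k memo (by omega) hInv
          have hval : cellG coins i j k
              = max pvNeg (cellG coins (i - 1) j k + pvCoin coins i j) := by
            rw [cellG]; simp only [if_neg hij, dif_pos hi0, dif_neg hj0, if_neg hg]
          simp only [dif_pos hi0, dif_neg hj0, if_neg hg, h1.1]
          exact ⟨hval.symm, by rw [← hval]; exact invB_insert coins _ i j k h1.2⟩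
        -- ¬hi0, hj0, hg
        · have h3 := ih i (j - 1) k memo (by omega) hInv
          have h4 := ih i (j - 1) (k - 1) _ (by omega) h3.2
          have hval : cellG coins i j k
              = max (max pvNeg (cellG coins i (j - 1) k + pvCoin coins i j))
                  (cellG coins i (j - 1) (k - 1)) := by
            rw [cellG]; simp only [if_neg hij, dif_neg hi0, dif_pos hj0, if_pos hg]
          simp only [dif_neg hi0, dif_pos hj0, if_pos hg, h3.1, h4.1]
          exact ⟨hval.symm, by rw [← hval]; exact invB_insert coins _ i j k h4.2⟩
        -- ¬hi0, hj0, ¬hg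
        · have h3 := ih i (j - 1) k memo (by omega) hInv
          have hval : cellG coins i j k
              = max pvNeg (cellG coins i (j - 1) k + pvCoin coins i j) := by
            rw [cellG]; simp only [if_neg hij, dif_neg hi0, dif_pos hj0, if_neg hg]
          simp only [dif_neg hi0, dif_pos hj0, if_neg hg, h3.1]
          exact ⟨hval.symm, by rw [← hval]; exact invB_insert coins _ i j k h3.2⟩
        · omega
        · omega

lemma cellG_eq_cellF (coins : List (List Int)) :
    ∀ N i j, i + j ≤ N → ∀ k, k < 3 → cellG coins i j k = pvNbGet (cellF coins i j) k := by
  intro N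
  induction N with
  | zero =>
    intro i j hN k hk
    have hi : i = 0 := by omega
    have hj : j = 0 := by omega
    subst hi; subst hj
    rw [cellG, cellF_base]
    unfold pvNbGet
    interval_cases k <;> simp <;> omega
  | succ N ih =>
    intro i j hN k hk
    by_cases hij : i = 0 ∧ j = 0
    · obtain ⟨rfl, rfl⟩ := hij
      rw [cellG, cellF_base]
      unfold pvNbGet
      interval_cases k <;> simp <;> omega
    · rw [cellF_step coins i j hij, nbGet_cellB _ _ _ k hk, cand_eq_candA]
      rw [cellG]
      rw [if_neg hij]
      by_cases hi0 : 0 < i <;> by_cases hj0 : 0 < j <;>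
        by_cases hg : 0 < k ∧ pvCoin coins i j < 0
      · have e1 := ih (i - 1) j (by omega) k hk
        have e2 := ih (i - 1) j (by omega) (k - 1) (by omega)
        have e3 := ih i (j - 1) (by omega) k hk
        have e4 := ih i (j - 1) (by omega) (k - 1) (by omega)
        simp [candA, hi0, hj0, hg, e1, e2, e3, e4]
      · have e1 := ih (i - 1) j (by omega) k hk
        have e3 := ih i (j - 1) (by omega) k hk
        simp [candA, hi0, hj0, hg, e1, e3]
      · have e1 := ih (i - 1) j (by omega) k hk
        have e2 := ih (i - 1) j (by omega) (k - 1) (by omega)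
        simp [candA, hi0, hj0, hg, e1, e2]
      · have e1 := ih (i - 1) j (by omega) k hk
        simp [candA, hi0, hj0, hg, e1]
      · have e3 := ih i (j - 1) (by omega) k hk
        have e4 := ih i (j - 1) (by omega) (k - 1) (by omega)
        simp [candA, hi0, hj0, hg, e3, e4]
      · have e3 := ih i (j - 1) (by omega) k hk
        simp [candA, hi0, hj0, hg, e3]
      · omega
      · omega

lemma pyGet0_headD (coins : List (List Int)) :
    (PySem.List.pyGet? coins 0).getD [] = coins.headD [] := by
  cases coins <;> simp [PySem.List.pyGet?_zero]

lemma getLast?_map_range {α : Type} (n : Nat) (g : Nat → α) (hn : 0 < n) :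
    ((List.range n).map g).getLast? = some (g (n-1)) := by
  rw [List.getLast?_eq_getElem?]
  simp [hn, Nat.sub_lt hn]

-- ===== VERDICT (by name: the statement is the Claim_ definition above) =====
theorem max_robot_sum_spec : Claim_equal_max_robot_sum := by
  unfold Claim_equal_max_robot_sum
  intro coins _ hpre
  obtain ⟨hne, hn0, _⟩ := hpre
  unfold Spec_max_robot_sum
  have hm : 0 < coins.length := List.length_pos_iff.mpr hne
  simp only [max_robot_sum, max_robot_sum_alt]
  rw [pyGet0_headD]
  rw [dp1_eq coins coins.length (coins.headD []).length hm hn0,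
      outerfold coins coins.length (coins.headD []).length coins.length le_rfl]
  have ext1 : PySem.List.pyGet?
      (tbl coins.length (coins.headD []).length (fPart coins coins.length 0)) (-1)
      = some ((List.range (coins.headD []).length).map
          (fPart coins coins.length 0 (coins.length - 1))) := by
    rw [PySem.List.pyGet?_neg_one]
    exact getLast?_map_range coins.length _ hm
  rw [ext1]
  simp only [Option.getD_some]
  have ext2 : PySem.List.pyGet?
      ((List.range (coins.headD []).length).map (fPart coins coins.length 0 (coins.length - 1))) (-1)
      = some (fPart coins coins.length 0 (coins.length - 1) ((coins.headD []).length - 1)) := by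
    rw [PySem.List.pyGet?_neg_one]
    exact getLast?_map_range (coins.headD []).length _ hn0
  rw [ext2]
  simp only [Option.getD_some]
  rw [fPart_on coins coins.length 0 (coins.length - 1) ((coins.headD []).length - 1)
      (Or.inl (by omega))]
  -- B side: the memoized recursion computes cellF's third component
  rw [(bestB_eval coins ((coins.length - 1) + ((coins.headD []).length - 1))
        (coins.length - 1) ((coins.headD []).length - 1) 2 PySem.Dict.empty le_rfl
        (invB_empty coins)).1,
      cellG_eq_cellF coins ((coins.length - 1) + ((coins.headD []).length - 1))
        (coins.length - 1) ((coins.headD []).length - 1) le_rfl 2 (by omega)]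
  simp [listify, pvNbGet, PySem.List.pyGet?_neg_one]
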